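-- pv_equiv track=rewrite | github.com/yl2526/codewars_related | Text align justify.py | pad_line
-- ===== SOURCE A (Python) =====
-- def pad_line(line, width):
--     words = line.split(' ')
--     if len(words) == 1:
--         return words[0]
--     total_spaces_needed = width - sum(map(len, words))
--
--     space_size = total_spaces_needed // (len(words) - 1)
--     bigger_total_spaces_needed = total_spaces_needed % (len(words) - 1)
--     spaces = [space_size + int(nth < bigger_total_spaces_needed) for nth in range(len(words) - 1)]
--     spaces.append(0)
--
--     return ''.join(w + ' ' * s for w, s in zip(words, spaces))
-- ===== SOURCE B (Python) =====
-- def pad_line(line, width):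
--     words = line.split(' ')
--     gaps = len(words) - 1
--     if gaps == 0:
--         return words[0]
--     total = width - sum(len(w) for w in words)
--     counts = [0] * gaps
--     for i in range(max(total, 0)):
--         counts[i % gaps] += 1
--     parts = []
--     for w, c in zip(words, counts):
--         parts.append(w)
--         parts.append(' ' * c)
--     parts.append(words[-1])
--     return ''.join(parts)
-- ===== Notes on version B (the rewrite author's own statement) =====
-- stated objective: alternative
-- what changed: B replaces A's floor-division/modulo closed form for the per-gap space counts by a round-robin loop that deals the needed spaces one at a time into counts[i % gaps], then builds the result from a parts list instead of joining per-pair concatenations.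
import Mathlib
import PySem

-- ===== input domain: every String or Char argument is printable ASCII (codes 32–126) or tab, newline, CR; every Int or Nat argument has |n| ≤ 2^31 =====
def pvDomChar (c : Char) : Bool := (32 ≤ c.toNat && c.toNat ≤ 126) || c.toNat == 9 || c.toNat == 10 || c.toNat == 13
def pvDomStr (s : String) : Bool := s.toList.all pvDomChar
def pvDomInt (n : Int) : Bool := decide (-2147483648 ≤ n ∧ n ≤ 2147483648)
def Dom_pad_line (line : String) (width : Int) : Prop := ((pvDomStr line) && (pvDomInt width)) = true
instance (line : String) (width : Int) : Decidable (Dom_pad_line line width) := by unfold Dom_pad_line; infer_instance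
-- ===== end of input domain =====

-- B replaces A's divmod closed form for the per-gap space counts by a round-robin
-- distribution loop (one space at a time into counts[i % gaps]) and builds the output
-- from a parts list; objective: alternative decomposition, same observable behaviour.

-- ===== PORT A =====
def pad_line (line : String) (width : Int) : String :=
  let words := (PySem.Str.split? line " ").getD []   -- sep " " ≠ "", so split? is some
  if words.length = 1 then
    PySem.List.pyGetD words 0 ""                     -- words[0]; in range since length = 1
  else
    let total_spaces_needed := width - (words.map PySem.Str.len).sum
    let space_size := PySem.Int.floordiv total_spaces_needed ((words.length : Int) - 1)
    let bigger := PySem.Int.mod total_spaces_needed ((words.length : Int) - 1)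
    let spaces := (PySem.List.pyRange 0 ((words.length : Int) - 1)).map
        (fun nth => space_size + (if nth < bigger then 1 else 0)) ++ [(0 : Int)]
    -- ''.join(w + ' ' * s …): '+' on strings and ' ' * s ported via List Char append
    -- and PySem.List.pyRepeat (exact, incl. negative s → empty)
    PySem.Str.join "" ((words.zip spaces).map
      (fun p => String.ofList (p.1.toList ++ PySem.List.pyRepeat [' '] p.2)))

-- ===== PORT B =====
def pad_line_alt (line : String) (width : Int) : String :=
  let words := (PySem.Str.split? line " ").getD []
  let gaps : Int := (words.length : Int) - 1
  if gaps = 0 then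
    PySem.List.pyGetD words 0 ""                     -- words[0]; in range since length = 1
  else
    let total := width - (words.map PySem.Str.len).sum
    let counts := (PySem.List.pyRange 0 (max total 0)).foldl
        (fun cs i =>
          PySem.List.pySetD cs (PySem.Int.mod i gaps)
            (PySem.List.pyGetD cs (PySem.Int.mod i gaps) 0 + 1))
        (PySem.List.pyRepeat [(0 : Int)] gaps)       -- [0] * gaps
    let parts := ((words.zip counts).foldl
        (fun acc p => acc ++ [p.1, String.ofList (PySem.List.pyRepeat [' '] p.2)]) [])
      ++ [PySem.List.pyGetD words (-1) ""]           -- words[-1]; in range: words ≠ []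
    PySem.Str.join "" parts

-- ===== PRECONDITION & SPEC =====
def Spec_pad_line (line : String) (width : Int) (out : String) : Prop := out = pad_line_alt line width
instance (line : String) (width : Int) (out : String) : Decidable (Spec_pad_line line width out) := by unfold Spec_pad_line; infer_instance

-- ===== CLAIM (what is proved, stated in full; the proofs are below) =====
def Claim_equal_pad_line : Prop := ∀ (line : String) (width : Int), Dom_pad_line line width → Spec_pad_line line width (pad_line line width)

-- ===== LEMMAS AND PROOFS =====

lemma join_empty_sep (ls : List (List Char)) : PySem.Chars.join [] ls = ls.flatten := by
  induction ls with
  | nil => rfl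
  | cons a t ih => cases t <;> simp_all [PySem.Chars.join, List.intercalate]

lemma rr_step (g m j : Nat) (hg : 0 < g) (hj : j < g) :
    (if m % g = j then (((m / g : Nat) : Int) + if m % g < m % g then (1:Int) else 0) + 1
     else ((m / g : Nat) : Int) + if j < m % g then (1:Int) else 0)
    = (((m+1) / g : Nat) : Int) + if j < (m+1) % g then (1:Int) else 0 := by
  have hm := Nat.div_add_mod m g
  have hrg : m % g < g := Nat.mod_lt _ hg
  rcases Nat.lt_or_ge (m % g + 1) g with hlt | hge
  · have hdiv : (m + 1) / g = m / g := by
      have h2 : m + 1 = g * (m / g) + (m % g + 1) := by omega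
      rw [h2, Nat.mul_add_div hg, Nat.div_eq_of_lt hlt]; omega
    have hmod : (m + 1) % g = m % g + 1 := by
      have h2 : m + 1 = g * (m / g) + (m % g + 1) := by omega
      rw [h2, Nat.mul_add_mod, Nat.mod_eq_of_lt hlt]
    rw [hdiv, hmod]
    clear hm
    generalize m % g = r at *
    split_ifs <;> omega
  · have hg1 : m % g + 1 = g := by omega
    have hdiv : (m + 1) / g = m / g + 1 := by
      have h2 : m + 1 = g * (m / g + 1) := by rw [Nat.mul_add, Nat.mul_one]; omega
      rw [h2, Nat.mul_div_cancel_left _ hg]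
    have hmod : (m + 1) % g = 0 := by
      have h2 : m + 1 = g * (m / g + 1) := by rw [Nat.mul_add, Nat.mul_one]; omega
      rw [h2, Nat.mul_mod_right]
    rw [hdiv, hmod]
    clear hm
    generalize m % g = r at *
    generalize m / g = q at *
    push_cast
    split_ifs <;> omega

-- the round-robin loop of B, on a counts list of length g, after m iterations
lemma counts_fold (g : Nat) (hg : 0 < g) (m : Nat) :
    (PySem.List.pyRange 0 (m : Int)).foldl
      (fun cs i => PySem.List.pySetD cs (PySem.Int.mod i (g : Int))
        (PySem.List.pyGetD cs (PySem.Int.mod i (g : Int)) 0 + 1))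
      (List.replicate g (0 : Int))
    = (List.range g).map (fun j => ((m / g : Nat) : Int) + if j < m % g then 1 else 0) := by
  induction m with
  | zero =>
      rw [Nat.cast_zero, PySem.List.pyRange_one_eq_nil (le_refl 0)]
      apply List.ext_getElem (by simp)
      intro j h1 h2
      simp [Nat.zero_div, Nat.zero_mod]
  | succ m ih =>
      have hcast : ((m + 1 : Nat) : Int) = (m : Int) + 1 := by push_cast; ring
      rw [hcast, PySem.List.pyRange_one_succ_right (by exact_mod_cast Nat.zero_le m),
          List.foldl_append, ih]
      simp only [List.foldl_cons, List.foldl_nil]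
      rw [PySem.Int.mod_natCast m g, PySem.List.pyGetD_natCast, PySem.List.pySetD_natCast]
      have hrg : m % g < g := Nat.mod_lt _ hg
      rw [List.getD_eq_getElem?_getD, List.getElem?_eq_getElem (by simpa using hrg)]
      simp only [Option.getD_some, List.getElem_map, List.getElem_range]
      apply List.ext_getElem (by simp)
      intro j h1 h2
      simp only [List.getElem_set, List.getElem_map, List.getElem_range]
      have hj : j < g := by simpa using h2
      exact rr_step g m j hg hj

-- joining A's pieces equals joining B's parts, given pointwise toNat-equal space counts
lemma build_eq (ws : List String) (hws : ws ≠ []) (xs ys : List Int)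
    (hx : xs.length = ws.length - 1) (hy : ys.length = ws.length - 1)
    (hxy : ∀ j, j < ws.length - 1 →
      (xs.getD j 0).toNat = (ys.getD j 0).toNat) :
    ((ws.zip (xs ++ [(0 : Int)])).map
        (fun p => p.1.toList ++ List.replicate p.2.toNat ' ')).flatten
    = ((ws.zip ys).flatMap
        (fun p => p.1.toList ++ List.replicate p.2.toNat ' '))
      ++ (ws.getLast hws).toList := by
  induction ws generalizing xs ys with
  | nil => exact absurd rfl hws
  | cons w t ih =>
      cases t with
      | nil =>
          have hx0 : xs = [] := List.length_eq_zero_iff.mp (by simpa using hx)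
          have hy0 : ys = [] := List.length_eq_zero_iff.mp (by simpa using hy)
          subst hx0; subst hy0
          simp [List.getLast]
      | cons w' t' =>
          cases xs with
          | nil => simp at hx
          | cons x xs' =>
              cases ys with
              | nil => simp at hy
              | cons y ys' =>
                  have h0 : x.toNat = y.toNat := by
                    have := hxy 0 (by simp)
                    simpa using this
                  have hrec := ih (by simp) xs' ys'
                    (by simpa using hx) (by simpa using hy)
                    (fun j hj => by
                      have := hxy (j + 1) (by simpa using Nat.succ_lt_succ (by simpa using hj))
                      simpa using this)
                  simp only [List.cons_append, List.zip_cons_cons, List.map_cons,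
                    List.flatten_cons, List.flatMap_cons]
                  rw [h0, hrec]
                  simp [List.append_assoc]

-- flattening B's two-element parts per zipped pair
lemma flatten_pairs (l : List (String × Int)) :
    ((l.flatMap (fun p => [p.1, String.ofList (PySem.List.pyRepeat [' '] p.2)])).map
        String.toList).flatten
    = l.flatMap (fun p => p.1.toList ++ List.replicate p.2.toNat ' ') := by
  induction l with
  | nil => rfl
  | cons a t ih =>
      simp_all [PySem.List.pyRepeat_singleton]

-- core equality, stated over the already-split word list
lemma core_eq (ws : List String) (width : Int) :
    (if ws.length = 1 then PySem.List.pyGetD ws 0 ""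
     else
       PySem.Str.join ""
         ((ws.zip
             ((PySem.List.pyRange 0 ((ws.length : Int) - 1)).map
                 (fun nth =>
                   PySem.Int.floordiv (width - (ws.map PySem.Str.len).sum) ((ws.length : Int) - 1) +
                     (if nth < PySem.Int.mod (width - (ws.map PySem.Str.len).sum) ((ws.length : Int) - 1) then 1 else 0))
               ++ [(0 : Int)])).map
           (fun p => String.ofList (p.1.toList ++ PySem.List.pyRepeat [' '] p.2))))
    =
    (if ((ws.length : Int) - 1) = 0 then PySem.List.pyGetD ws 0 ""
     else
       PySem.Str.join ""
         ((((ws.zip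
               ((PySem.List.pyRange 0 (max (width - (ws.map PySem.Str.len).sum) 0)).foldl
                   (fun cs i =>
                     PySem.List.pySetD cs (PySem.Int.mod i ((ws.length : Int) - 1))
                       (PySem.List.pyGetD cs (PySem.Int.mod i ((ws.length : Int) - 1)) 0 + 1))
                   (PySem.List.pyRepeat [(0 : Int)] ((ws.length : Int) - 1)))).foldl
             (fun acc p => acc ++ [p.1, String.ofList (PySem.List.pyRepeat [' '] p.2)]) [])
           ++ [PySem.List.pyGetD ws (-1) ""]))) := by
  by_cases hlen : ws.length = 1
  · rw [if_pos hlen, if_pos (by rw [hlen]; norm_num)]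
  · rw [if_neg hlen, if_neg (by intro h; apply hlen; omega)]
    match ws with
    | [] =>
        apply String.toList_inj.mp
        simp [PySem.Str.toList_join, PySem.List.pyGetD,
          PySem.List.pyGet?, PySem.List.pyIdx?, List.zip_nil_left]
    | w :: w' :: t' =>
        clear hlen
        have hg : 0 < t'.length + 1 := Nat.succ_pos _
        have hgi : (((w :: w' :: t').length : Int) - 1) = ((t'.length + 1 : Nat) : Int) := by
          simp [List.length_cons]
        rw [hgi]
        set T := width - ((w :: w' :: t').map PySem.Str.len).sum with hT
        have hM : max T 0 = (((max T 0).toNat : Nat) : Int) :=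
          (Int.toNat_of_nonneg (le_max_right T 0)).symm
        rw [hM, PySem.List.pyRepeat_singleton, Int.toNat_natCast,
          counts_fold (t'.length + 1) hg (max T 0).toNat]
        apply String.toList_inj.mp
        rw [PySem.Str.toList_join, PySem.Str.toList_join, String.toList_empty,
          join_empty_sep, join_empty_sep,
          PySem.List.foldl_append_eq_flatMap, List.nil_append, List.map_append,
          List.flatten_append, flatten_pairs,
          PySem.List.pyGetD_neg_one _ _ (by simp : w :: w' :: t' ≠ [])]
        simp only [List.map_map, List.map_cons, List.map_nil, List.flatten_cons,
          List.flatten_nil, List.append_nil, Function.comp_def, String.toList_ofList,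
          PySem.List.pyRepeat_singleton]
        have := build_eq (w :: w' :: t') (by simp)
          ((PySem.List.pyRange 0 ((t'.length + 1 : Nat) : Int)).map
            (fun nth => PySem.Int.floordiv T ((t'.length + 1 : Nat) : Int) +
              if nth < PySem.Int.mod T ((t'.length + 1 : Nat) : Int) then 1 else 0))
          ((List.range (t'.length + 1)).map
            (fun j => (((max T 0).toNat / (t'.length + 1) : Nat) : Int) +
              if j < (max T 0).toNat % (t'.length + 1) then 1 else 0))
          (by simp [PySem.List.length_pyRange_one])
          (by simp)
          ?_
        · exact this
        · intro j hj
          have hj' : j < t'.length + 1 := by simpa using hj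
          have hjr : j < (PySem.List.pyRange 0 ((t'.length + 1 : Nat) : Int)).length := by
            simp [PySem.List.length_pyRange_one]; omega
          rw [List.getD_eq_getElem?_getD, List.getElem?_map,
            List.getElem?_eq_getElem hjr, List.getD_eq_getElem?_getD,
            List.getElem?_map, List.getElem?_eq_getElem (by simpa using hj')]
          simp only [Option.map_some, Option.getD_some, List.getElem_range,
            PySem.List.getElem_pyRange_one]
          rcases (le_or_gt 0 T) with hpos | hneg
          · have hmax : max T 0 = T := max_eq_left hpos
            have hTn : T = ((T.toNat : Nat) : Int) := (Int.toNat_of_nonneg hpos).symm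
            rw [hmax, hTn, PySem.Int.floordiv_natCast, PySem.Int.mod_natCast]
            simp only [Int.toNat_natCast]
            split_ifs <;> omega
          · have hmax : max T 0 = 0 := max_eq_right (le_of_lt hneg)
            have hq : PySem.Int.floordiv T ((t'.length + 1 : Nat) : Int) < 0 := by
              rw [PySem.Int.floordiv_lt_iff_lt_mul (by exact_mod_cast hg)]
              simpa using hneg
            rw [hmax]
            simp only [Int.toNat_zero, Nat.zero_div, Nat.zero_mod, Nat.not_lt_zero,
              if_false, Nat.cast_zero, add_zero]
            split_ifs <;> omega
-- ===== VERDICT (by name: the statement is the Claim_ definition above) =====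
theorem pad_line_spec : Claim_equal_pad_line := by
  intro line width _
  unfold Spec_pad_line pad_line pad_line_alt
  exact core_eq ((PySem.Str.split? line " ").getD []) width
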